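-- pv_equiv track=rewrite | github.com/amuvarma13/bigds | older/fc_interleave.py | process_facodec
-- ===== SOURCE A (Python) =====
-- def process_facodec(example):
--     facodec_1 = example['facodec_1']
--     facodec_0 = example['facodec_0']
--
--     # Interleave and add required values
--     interleaved = []
--     for f1, f0 in zip(facodec_1, facodec_0):
--         interleaved.append(f1 + 256003)
--         interleaved.append(f0 + 258000)
--
--     example['interleaved_facodec'] = interleaved
--     return example
-- ===== SOURCE B (Python) =====
-- def process_facodec(example):
--     f1 = example['facodec_1']
--     f0 = example['facodec_0']
--     n = min(len(f1), len(f0))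
--     buf = [0] * (2 * n)
--     buf[0::2] = [x + 256003 for x in f1[:n]]
--     buf[1::2] = [x + 258000 for x in f0[:n]]
--     example['interleaved_facodec'] = buf
--     return example
-- ===== Notes on version B (the rewrite author's own statement) =====
-- stated objective: alternative
-- what changed: Replaces the alternating-append loop over zip with a preallocated 2*min-length buffer filled by two independent strided slice assignments (evens then odds).
import Mathlib
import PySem

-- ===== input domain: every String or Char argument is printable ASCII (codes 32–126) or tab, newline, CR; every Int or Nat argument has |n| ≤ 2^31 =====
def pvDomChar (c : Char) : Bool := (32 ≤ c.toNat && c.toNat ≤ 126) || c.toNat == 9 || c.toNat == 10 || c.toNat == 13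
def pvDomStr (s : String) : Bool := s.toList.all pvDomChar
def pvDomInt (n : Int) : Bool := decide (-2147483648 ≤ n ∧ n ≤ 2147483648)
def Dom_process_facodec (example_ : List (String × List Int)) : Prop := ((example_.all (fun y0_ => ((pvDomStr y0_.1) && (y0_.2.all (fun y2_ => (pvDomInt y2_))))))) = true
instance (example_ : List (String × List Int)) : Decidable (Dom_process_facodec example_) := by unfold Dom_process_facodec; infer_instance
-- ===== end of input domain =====

-- B changes the decomposition only: two independent strided fills of a preallocated buffer
-- instead of A's single alternating-append loop over zip; same O(n) cost.
-- Note: the Python functions mutate `example` in place; the equivalence proved here is about the return value.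

-- ===== PORT A =====
def process_facodec (example_ : List (String × List Int)) : List (String × List Int) :=
  let d := PySem.Dict.mk example_
  match d.get? "facodec_1", d.get? "facodec_0" with
  | some facodec_1, some facodec_0 =>
    -- for f1, f0 in zip(...): interleaved.append(f1 + 256003); interleaved.append(f0 + 258000)
    let interleaved := (facodec_1.zip facodec_0).foldl
      (fun acc p => (acc ++ [p.1 + 256003]) ++ [p.2 + 258000]) []
    (d.insert "interleaved_facodec" interleaved).items
  | _, _ => []   -- KeyError in Python; excluded by Pre_

-- ===== PORT B =====
def process_facodec_alt (example_ : List (String × List Int)) : List (String × List Int) :=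
  let d := PySem.Dict.mk example_
  match d.get? "facodec_1" with
  | none => []   -- KeyError; excluded by Pre_
  | some f1 =>
  match d.get? "facodec_0" with
  | none => []   -- KeyError; excluded by Pre_
  | some f0 =>
    let n := min f1.length f0.length
    let evens := (f1.take n).map (· + 256003)   -- [x + 256003 for x in f1[:n]]
    let odds  := (f0.take n).map (· + 258000)   -- [x + 258000 for x in f0[:n]]
    -- buf = [0]*(2n); buf[0::2] = evens; buf[1::2] = odds  — the preallocated buffer is
    -- modelled positionally: slot i holds evens[i/2] at even i, odds[i/2] at odd i (exact).
    let buf := (List.range (2 * n)).map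
      (fun i => if i % 2 == 0 then evens.getD (i / 2) 0 else odds.getD (i / 2) 0)
    (d.insert "interleaved_facodec" buf).items

-- ===== PRECONDITION & SPEC =====
-- Pre_ excludes exactly the inputs on which A raises KeyError (a missing key).
def Pre_process_facodec (example_ : List (String × List Int)) : Prop :=
  ((PySem.Dict.mk example_).contains "facodec_1") = true ∧
  ((PySem.Dict.mk example_).contains "facodec_0") = true
instance (example_ : List (String × List Int)) : Decidable (Pre_process_facodec example_) := by unfold Pre_process_facodec; infer_instance

def pvWitness_process_facodec : (List (String × List Int)) :=
  [("facodec_1", [1, 2, 3]), ("facodec_0", [10, 20])]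

def Spec_process_facodec (example_ : List (String × List Int)) (out : List (String × List Int)) : Prop := out = process_facodec_alt example_
instance (example_ : List (String × List Int)) (out : List (String × List Int)) : Decidable (Spec_process_facodec example_ out) := by unfold Spec_process_facodec; infer_instance

-- ===== CLAIM (what is proved, stated in full; the proofs are below) =====
def Claim_equal_process_facodec : Prop := ∀ (example_ : List (String × List Int)), Dom_process_facodec example_ → Pre_process_facodec example_ → Spec_process_facodec example_ (process_facodec example_)

-- ===== LEMMAS AND PROOFS =====

-- A's loop body appends, so the fold is init ++ flatMap.
theorem pv_foldl_interleave (l : List (Int × Int)) (init : List Int) :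
    l.foldl (fun acc p => (acc ++ [p.1 + 256003]) ++ [p.2 + 258000]) init
      = init ++ l.flatMap (fun p => [p.1 + 256003, p.2 + 258000]) := by
  induction l generalizing init with
  | nil => simp
  | cons p t ih => simp [List.foldl, List.flatMap]

theorem pv_range_two_mul_succ (n : Nat) :
    List.range (2 * (n + 1)) = 0 :: 1 :: (List.range (2 * n)).map (· + 2) := by
  have h : 2 * (n + 1) = (2 * n) + 1 + 1 := by ring
  rw [h, List.range_succ_eq_map, List.range_succ_eq_map]
  simp [List.map_map, Function.comp]

-- flatMap over the zip equals the strided positional description.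
theorem pv_flatMap_eq_strided (l : List (Int × Int)) :
    l.flatMap (fun p => [p.1 + 256003, p.2 + 258000])
      = (List.range (2 * l.length)).map
          (fun i => if i % 2 == 0 then (l.map (fun p => p.1 + 256003)).getD (i / 2) 0
                    else (l.map (fun p => p.2 + 258000)).getD (i / 2) 0) := by
  induction l with
  | nil => simp
  | cons p t ih =>
    rw [List.length_cons, pv_range_two_mul_succ]
    simp only [List.flatMap_cons, List.map_cons, List.map_map, List.cons_append, List.nil_append]
    refine congrArg₂ List.cons (by norm_num) ?_
    refine congrArg₂ List.cons (by norm_num) ?_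
    refine ih.trans (List.map_congr_left (fun i _ => ?_))
    have h2 : (i + 2) % 2 = i % 2 := by omega
    have h3 : (i + 2) / 2 = i / 2 + 1 := by omega
    simp [Function.comp, h2, h3]

-- take (min) of each component of a zip recovers the component maps.
theorem pv_zip_fst (f1 f0 : List Int) :
    (f1.zip f0).map (fun p => p.1 + 256003)
      = (f1.take (min f1.length f0.length)).map (· + 256003) := by
  induction f1 generalizing f0 with
  | nil => simp
  | cons a t ih =>
    cases f0 with
    | nil => simp
    | cons b s => simp [List.zip_cons_cons, Nat.succ_min_succ, ih]

theorem pv_zip_snd (f1 f0 : List Int) :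
    (f1.zip f0).map (fun p => p.2 + 258000)
      = (f0.take (min f1.length f0.length)).map (· + 258000) := by
  induction f1 generalizing f0 with
  | nil => simp
  | cons a t ih =>
    cases f0 with
    | nil => simp
    | cons b s => simp [List.zip_cons_cons, Nat.succ_min_succ, ih]

theorem pv_zip_length (f1 f0 : List Int) :
    (f1.zip f0).length = min f1.length f0.length := List.length_zip ..

-- ===== VERDICT (by name: the statement is the Claim_ definition above) =====
theorem process_facodec_spec : Claim_equal_process_facodec := by
  intro example_ _ hpre
  unfold Spec_process_facodec process_facodec process_facodec_alt
  obtain ⟨h1, h0⟩ := hpre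
  rw [PySem.Dict.contains_eq_isSome_get?] at h1 h0
  cases hg1 : (PySem.Dict.mk example_).get? "facodec_1" with
  | none => rw [hg1] at h1; simp at h1
  | some f1 =>
    cases hg0 : (PySem.Dict.mk example_).get? "facodec_0" with
    | none => rw [hg0] at h0; simp at h0
    | some f0 =>
      simp only [hg1, hg0]
      congr 2
      rw [pv_foldl_interleave, List.nil_append, pv_flatMap_eq_strided,
          pv_zip_fst, pv_zip_snd, pv_zip_length]
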